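-- pv_equiv track=rewrite | github.com/dnyaneshwar-Patil1999/Storyboard-backend_test | from_sudeep/extract_docx_xml.py | _is_bullet_style
-- ===== SOURCE A (Python) =====
-- def _resolve_name_chain(style_id, style_map):
--     """Walk the basedOn inheritance chain, return list of (name, styleId)."""
--     chain, visited = [], set()
--     sid = style_id
--     while sid and sid not in visited:
--         visited.add(sid)
--         info = style_map.get(sid, {})
--         chain.append((info.get("name", "").lower(), sid))
--         sid = info.get("basedOn", "")
--     return chain
--
-- def _is_bullet_style(style_id, style_map):
--     """
--     Check if a style represents a bullet/list item.
--     Catches: "List Paragraph", "List Bullet", "BT Bullet 1",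
--     "Normal Bullet 1", "Table bullet 1", "Content Indent Bullet", etc.
--     """
--     for name, _ in _resolve_name_chain(style_id, style_map):
--         clean = name.replace(" ", "").lower()
--         # Standard list styles
--         if "listparagraph" in clean or "listbullet" in clean or "listnumber" in clean:
--             return True
--         # Custom bullet styles (catches "BT Bullet 1", "Normal Bullet 1", etc.)
--         if "bullet" in clean:
--             return True
--     return False
-- ===== SOURCE B (Python) =====
-- def _matches(name):
--     clean = name.lower().replace(" ", "")
--     return ("listparagraph" in clean or "listbullet" in clean
--             or "listnumber" in clean or "bullet" in clean)
--
-- def _is_bullet_style(style_id, style_map):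
--     """Precompute the set of bullet-named style ids, then follow basedOn links
--     through not-yet-visited ids until a bullet id is reached or the chain dies."""
--     bullet_ids = {sid for sid in style_map if _matches(style_map[sid].get("name", ""))}
--     remaining = set(style_map)
--     sid = style_id
--     while sid:
--         if sid in bullet_ids:
--             return True
--         if sid not in remaining:
--             return False
--         remaining.discard(sid)
--         sid = style_map[sid].get("basedOn", "")
--     return False
-- ===== Notes on version B (the rewrite author's own statement) =====
-- stated objective: alternative
-- what changed: Replaces A's build-the-full-name-chain-then-scan structure by precomputing the set of style ids whose own name matches the bullet patterns in one pass over the map, then walking the basedOn links through a shrinking set of not-yet-visited ids and testing plain set membership at each step.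
import Mathlib
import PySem

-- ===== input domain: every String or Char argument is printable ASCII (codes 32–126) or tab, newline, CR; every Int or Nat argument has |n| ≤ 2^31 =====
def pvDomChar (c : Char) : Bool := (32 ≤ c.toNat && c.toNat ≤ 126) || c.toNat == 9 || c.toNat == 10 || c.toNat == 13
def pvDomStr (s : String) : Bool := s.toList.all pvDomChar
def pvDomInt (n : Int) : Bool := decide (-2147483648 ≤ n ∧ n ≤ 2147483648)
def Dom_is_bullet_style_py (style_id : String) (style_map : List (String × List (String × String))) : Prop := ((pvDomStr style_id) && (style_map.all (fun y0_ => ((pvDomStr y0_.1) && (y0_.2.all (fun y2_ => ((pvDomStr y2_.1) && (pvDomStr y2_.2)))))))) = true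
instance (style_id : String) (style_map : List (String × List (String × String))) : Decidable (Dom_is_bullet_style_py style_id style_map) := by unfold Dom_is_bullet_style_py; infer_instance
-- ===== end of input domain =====

-- B replaces A's build-the-full-name-chain-then-scan structure by first collecting the set of
-- style ids whose own name matches the bullet patterns, then walking the basedOn links through
-- a shrinking set of not-yet-visited ids, testing set membership at each step (objective: alternative).
-- A's while-loop is ported with fuel style_map.length + 1, which provably exceeds the number of
-- iterations Python can perform (each iteration either visits a fresh key of style_map or ends the loop).

-- ===== PORT A =====
-- dict.get(k, default) on the style map / on one style's info dict
def pvGetMap (style_map : List (String × List (String × String))) (k : String) : List (String × String) :=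
  PySem.Dict.getD ⟨style_map⟩ k []

def pvGetS (info : List (String × String)) (k : String) : String :=
  PySem.Dict.getD ⟨info⟩ k ""

-- _resolve_name_chain: while sid and sid not in visited: append (name.lower(), sid); sid = basedOn
def resolveNameChain (style_map : List (String × List (String × String))) :
    Nat → String → PySem.Set String → List (String × String)
  | 0, _, _ => []
  | fuel + 1, sid, visited =>
    if sid = "" then []
    else if PySem.Set.contains visited sid then []
    else
      let info := pvGetMap style_map sid
      (PySem.Str.lower (pvGetS info "name"), sid) ::
        resolveNameChain style_map fuel (pvGetS info "basedOn") (PySem.Set.add visited sid)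

-- the for-loop of _is_bullet_style with its early returns
def scanChain : List (String × String) → Bool
  | [] => false
  | (name, _) :: rest =>
    let clean := PySem.Str.lower (PySem.Str.replace name " " "")
    if PySem.Str.isIn "listparagraph" clean || PySem.Str.isIn "listbullet" clean ||
        PySem.Str.isIn "listnumber" clean then true
    else if PySem.Str.isIn "bullet" clean then true
    else scanChain rest

def is_bullet_style_py (style_id : String) (style_map : List (String × List (String × String))) : Bool :=
  scanChain (resolveNameChain style_map (style_map.length + 1) style_id PySem.Set.empty)

-- ===== PORT B =====
-- _matches(name)
def pvMatches (name : String) : Bool :=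
  let clean := PySem.Str.replace (PySem.Str.lower name) " " ""
  PySem.Str.isIn "listparagraph" clean || PySem.Str.isIn "listbullet" clean ||
    PySem.Str.isIn "listnumber" clean || PySem.Str.isIn "bullet" clean

-- bullet_ids = {sid for sid in style_map if _matches(style_map[sid].get("name", ""))}
def pvBulletIds (style_map : List (String × List (String × String))) : PySem.Set String :=
  (PySem.Dict.keys (⟨style_map⟩ : PySem.Dict String (List (String × String)))).foldl
    (fun s sid =>
      if pvMatches (PySem.Dict.getD ⟨PySem.Dict.getD ⟨style_map⟩ sid []⟩ "name" "")
      then PySem.Set.add s sid else s)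
    PySem.Set.empty

-- the while-loop: membership in bullet_ids / remaining, discard, follow basedOn
def pvChainHits (style_map : List (String × List (String × String)))
    (bullets : PySem.Set String) (sid : String) (remaining : PySem.Set String) : Bool :=
  if sid = "" then false
  else if PySem.Set.contains bullets sid then true
  else if h : PySem.Set.contains remaining sid = true then
    pvChainHits style_map bullets
      (PySem.Dict.getD ⟨PySem.Dict.getD ⟨style_map⟩ sid []⟩ "basedOn" "")
      (PySem.Set.discard remaining sid)
  else false
termination_by remaining.length
decreasing_by
  simp only [PySem.Set.discard]
  exact List.length_filter_lt_length_iff_exists.mpr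
    ⟨sid, (PySem.Set.contains_iff _ _).mp h, by simp⟩

def is_bullet_style_py_alt (style_id : String) (style_map : List (String × List (String × String))) : Bool :=
  pvChainHits style_map (pvBulletIds style_map) style_id
    (PySem.Set.ofList (PySem.Dict.keys (⟨style_map⟩ : PySem.Dict String (List (String × String)))))

-- ===== PRECONDITION & SPEC =====
def Spec_is_bullet_style_py (style_id : String) (style_map : List (String × List (String × String))) (out : Bool) : Prop := out = is_bullet_style_py_alt style_id style_map
instance (style_id : String) (style_map : List (String × List (String × String))) (out : Bool) : Decidable (Spec_is_bullet_style_py style_id style_map out) := by unfold Spec_is_bullet_style_py; infer_instance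

-- ===== CLAIM (what is proved, stated in full; the proofs are below) =====
def Claim_equal_is_bullet_style_py : Prop := ∀ (style_id : String) (style_map : List (String × List (String × String))), Dom_is_bullet_style_py style_id style_map → Spec_is_bullet_style_py style_id style_map (is_bullet_style_py style_id style_map)

-- ===== LEMMAS AND PROOFS =====
-- lower swallows itself: lowerChar is idempotent
lemma pv_lowerChar_idem (c : Char) :
    PySem.Chars.lowerChar (PySem.Chars.lowerChar c) = PySem.Chars.lowerChar c := by
  simp only [PySem.Chars.lowerChar, PySem.Chars.isupper]
  by_cases h : ('A' ≤ c ∧ c ≤ 'Z')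
  · have h65 : 65 ≤ c.toNat := h.1
    have h90 : c.toNat ≤ 90 := h.2
    have hv : (Char.ofNat (c.toNat + 32)).toNat = c.toNat + 32 := by
      rw [Char.toNat_ofNat, if_pos (Or.inl (by omega))]
    have hc : (decide ('A' ≤ c) && decide (c ≤ 'Z')) = true := by simp [h.1, h.2]
    simp only [hc, if_true]
    have hz : ¬ ((decide ('A' ≤ Char.ofNat (c.toNat + 32)) && decide (Char.ofNat (c.toNat + 32) ≤ 'Z')) = true) := by
      intro hx
      have : (Char.ofNat (c.toNat + 32)).toNat ≤ 90 :=
        of_decide_eq_true ((Bool.and_eq_true _ _).mp hx).2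
      omega
    rw [if_neg hz]
  · have hfalse : ((decide ('A' ≤ c) && decide (c ≤ 'Z')) = true) = False := by
      rcases not_and_or.mp h with h' | h' <;> simp [h']
    simp [hfalse]

-- the replace.go loop with old = " ", new = "" just filters out spaces
lemma pv_replace_go_space (fuel : Nat) : ∀ (l acc : List Char), l.length ≤ fuel →
    PySem.Chars.replace.go [' '] [] fuel l acc = acc.reverse ++ l.filter (fun c => !(c == ' ')) := by
  induction fuel with
  | zero =>
    intro l acc h
    have : l = [] := List.length_eq_zero_iff.mp (Nat.le_zero.mp h)
    subst this
    simp [PySem.Chars.replace.go]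
  | succ n ih =>
    intro l acc h
    match l with
    | [] => simp [PySem.Chars.replace.go]
    | c :: t =>
      rw [PySem.Chars.replace.go]
      by_cases hc : c = ' '
      · subst hc
        have hp : [' '].isPrefixOf (' ' :: t) = true := by simp [List.isPrefixOf]
        rw [if_pos hp]
        simp only [List.length_cons] at h
        simpa using ih _ _ (by omega)
      · have hp : [' '].isPrefixOf (c :: t) = false := by
          simp [List.isPrefixOf]
          intro h'; exact hc h'.symm
        rw [if_neg (by simp [hp])]
        simp only [List.length_cons] at h
        rw [ih _ _ (by omega)]
        simp [hc]

lemma pv_replace_space (m : List Char) :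
    PySem.Chars.replace m [' '] [] = m.filter (fun c => !(c == ' ')) := by
  rw [PySem.Chars.replace]
  rw [if_neg (by simp)]
  simpa using pv_replace_go_space m.length m [] (le_refl _)

-- A's clean string equals B's clean string, as char lists
lemma pv_clean_eq (n : List Char) :
    PySem.Chars.lower (PySem.Chars.replace (PySem.Chars.lower n) [' '] []) =
      PySem.Chars.replace (PySem.Chars.lower n) [' '] [] := by
  rw [pv_replace_space]
  simp only [PySem.Chars.lower, List.filter_map, List.map_map]
  exact List.map_congr_left (fun c _ => pv_lowerChar_idem c)

lemma pv_clean_eq_str (n : String) :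
    PySem.Str.lower (PySem.Str.replace (PySem.Str.lower n) " " "") =
      PySem.Str.replace (PySem.Str.lower n) " " "" := by
  apply String.toList_inj.mp
  simp only [PySem.Str.toList_lower, PySem.Str.toList_replace]
  have h1 : (" " : String).toList = [' '] := rfl
  have h0 : ("" : String).toList = [] := rfl
  rw [h1, h0]
  exact pv_clean_eq n.toList

-- A's if-chain (three-way or, then "bullet", then the continuation) as one boolean or
lemma pv_ifchain (clean : String) (x : Bool) :
    (if PySem.Str.isIn "listparagraph" clean || PySem.Str.isIn "listbullet" clean ||
        PySem.Str.isIn "listnumber" clean then true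
     else if PySem.Str.isIn "bullet" clean then true
     else x) =
      ((PySem.Str.isIn "listparagraph" clean || PySem.Str.isIn "listbullet" clean ||
        PySem.Str.isIn "listnumber" clean || PySem.Str.isIn "bullet" clean) || x) := by
  cases h1 : (PySem.Str.isIn "listparagraph" clean) <;>
    cases h2 : (PySem.Str.isIn "listbullet" clean) <;>
      cases h3 : (PySem.Str.isIn "listnumber" clean) <;>
        cases h4 : (PySem.Str.isIn "bullet" clean) <;> simp [h1, h2, h3, h4]

-- membership in the foldl that builds the bullet-id set
lemma pv_mem_foldl_add_if (p : String → Bool) (l : List String) :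
    ∀ (s0 : PySem.Set String) (x : String),
      x ∈ l.foldl (fun s k => if p k then PySem.Set.add s k else s) s0 ↔
        x ∈ s0 ∨ (x ∈ l ∧ p x = true) := by
  induction l with
  | nil => intro s0 x; simp
  | cons k t ih =>
    intro s0 x
    simp only [List.foldl_cons, List.mem_cons]
    by_cases hx : x = k
    · subst hx
      by_cases hp : p x = true
      · rw [if_pos hp, ih]
        simp [PySem.Set.mem_add, hp]
      · rw [if_neg hp, ih]
        simp only [Bool.not_eq_true] at hp
        simp [hp]
    · by_cases hp : p k = true
      · rw [if_pos hp, ih, PySem.Set.mem_add]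
        constructor
        · rintro ((h | h) | h)
          · exact Or.inl h
          · exact absurd h hx
          · exact Or.inr ⟨Or.inr h.1, h.2⟩
        · rintro (h | ⟨(h | h), hpx⟩)
          · exact Or.inl (Or.inl h)
          · exact absurd h hx
          · exact Or.inr ⟨h, hpx⟩
      · rw [if_neg hp, ih]
        constructor
        · rintro (h | h)
          · exact Or.inl h
          · exact Or.inr ⟨Or.inr h.1, h.2⟩
        · rintro (h | ⟨(h | h), hpx⟩)
          · exact Or.inl h
          · exact absurd h hx
          · exact Or.inr ⟨h, hpx⟩

-- a key is in style_map iff Dict.contains holds iff it appears among the keys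
lemma pv_contains_iff_mem_keys (style_map : List (String × List (String × String))) (k : String) :
    PySem.Dict.contains (⟨style_map⟩ : PySem.Dict String (List (String × String))) k = true ↔
      k ∈ PySem.Dict.keys (⟨style_map⟩ : PySem.Dict String (List (String × String))) := by
  simp [PySem.Dict.contains, PySem.Dict.keys, List.any_eq_true, List.mem_map]

-- a non-key looks up to the empty info dict
lemma pv_getMap_of_not_contains (style_map : List (String × List (String × String))) (k : String)
    (h : PySem.Dict.contains (⟨style_map⟩ : PySem.Dict String (List (String × String))) k = false) :
    pvGetMap style_map k = [] := by
  simp only [PySem.Dict.contains, List.any_eq_false] at h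
  simp only [pvGetMap, PySem.Dict.getD, PySem.Dict.get?]
  rw [List.find?_eq_none.mpr (fun p hp => by simpa using h p hp)]
  rfl

-- membership in pvBulletIds: a key whose (first-match) name matches
lemma pv_mem_bulletIds (style_map : List (String × List (String × String))) (x : String) :
    x ∈ pvBulletIds style_map ↔
      PySem.Dict.contains (⟨style_map⟩ : PySem.Dict String (List (String × String))) x = true ∧
        pvMatches (pvGetS (pvGetMap style_map x) "name") = true := by
  unfold pvBulletIds
  rw [pv_mem_foldl_add_if]
  simp only [PySem.Set.empty]
  rw [pv_contains_iff_mem_keys]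
  constructor
  · rintro (h | h)
    · simp at h
    · exact ⟨h.1, h.2⟩
  · intro h; exact Or.inr ⟨h.1, h.2⟩

lemma pv_matches_empty : pvMatches "" = false := by decide

-- resolveNameChain of the empty sid is the empty chain (any fuel)
lemma pv_resolve_empty_sid (style_map : List (String × List (String × String)))
    (fuel : Nat) (visited : PySem.Set String) :
    resolveNameChain style_map fuel "" visited = [] := by
  cases fuel with
  | zero => rfl
  | succ n => simp [resolveNameChain]

-- main invariant lemma: A's chain-scan = B's set walk
lemma pv_main (style_map : List (String × List (String × String))) :
    ∀ (fuel : Nat) (sid : String) (visited remaining : PySem.Set String),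
      (∀ k, k ∈ remaining → k ∉ visited) →
      (∀ k, PySem.Dict.contains (⟨style_map⟩ : PySem.Dict String (List (String × String))) k = true →
          k ∉ visited → k ∈ remaining) →
      (∀ k, k ∈ visited → k ∉ pvBulletIds style_map) →
      remaining.length < fuel →
      scanChain (resolveNameChain style_map fuel sid visited) =
        pvChainHits style_map (pvBulletIds style_map) sid remaining := by
  intro fuel
  induction fuel with
  | zero => intro sid visited remaining _ _ _ hlen; omega
  | succ n ih =>
    intro sid visited remaining hIa hIb hIc hlen
    rw [pvChainHits]
    by_cases h0 : sid = ""
    · subst h0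
      rw [pv_resolve_empty_sid]
      simp [scanChain]
    · rw [if_neg h0]
      rw [resolveNameChain]
      rw [if_neg h0]
      by_cases hv : PySem.Set.contains visited sid = true
      · -- sid already visited: both sides stop with false
        rw [if_pos hv]
        have hmemv : sid ∈ visited := (PySem.Set.contains_iff _ _).mp hv
        have hb : PySem.Set.contains (pvBulletIds style_map) sid = false := by
          rw [← Bool.not_eq_true, PySem.Set.contains_iff]
          exact hIc sid hmemv
        rw [hb, if_neg (Bool.false_ne_true)]
        have hr : PySem.Set.contains remaining sid ≠ true := fun hc =>
          hIa sid ((PySem.Set.contains_iff _ _).mp hc) hmemv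
        rw [dif_neg hr]
        rfl
      · rw [if_neg hv]
        have hnv : sid ∉ visited := fun hm => hv ((PySem.Set.contains_iff _ _).mpr hm)
        simp only [scanChain]
        rw [pv_clean_eq_str, pv_ifchain]
        have hms : (PySem.Str.isIn "listparagraph" (PySem.Str.replace (PySem.Str.lower (pvGetS (pvGetMap style_map sid) "name")) " " "") ||
            PySem.Str.isIn "listbullet" (PySem.Str.replace (PySem.Str.lower (pvGetS (pvGetMap style_map sid) "name")) " " "") ||
            PySem.Str.isIn "listnumber" (PySem.Str.replace (PySem.Str.lower (pvGetS (pvGetMap style_map sid) "name")) " " "") ||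
            PySem.Str.isIn "bullet" (PySem.Str.replace (PySem.Str.lower (pvGetS (pvGetMap style_map sid) "name")) " " "")) =
            pvMatches (pvGetS (pvGetMap style_map sid) "name") := rfl
        rw [hms]
        by_cases hm : pvMatches (pvGetS (pvGetMap style_map sid) "name") = true
        · -- the name matches: sid must be a key, hence in bullet_ids
          rw [hm, Bool.true_or]
          have hkey : PySem.Dict.contains (⟨style_map⟩ : PySem.Dict String (List (String × String))) sid = true := by
            by_contra hnk
            rw [Bool.not_eq_true] at hnk
            rw [pv_getMap_of_not_contains style_map sid hnk] at hm
            have : pvGetS [] "name" = "" := rfl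
            rw [this] at hm
            exact absurd hm (by rw [pv_matches_empty]; simp)
          have hb : PySem.Set.contains (pvBulletIds style_map) sid = true := by
            rw [PySem.Set.contains_iff]
            exact (pv_mem_bulletIds style_map sid).mpr ⟨hkey, hm⟩
          rw [hb, if_pos rfl]
        · -- no match: sid is not in bullet_ids; compare the continuations
          rw [Bool.not_eq_true] at hm
          rw [hm, Bool.false_or]
          have hb : PySem.Set.contains (pvBulletIds style_map) sid = false := by
            rw [← Bool.not_eq_true, PySem.Set.contains_iff, pv_mem_bulletIds]
            intro hbm
            rw [hbm.2] at hm
            exact Bool.noConfusion hm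
          rw [hb, if_neg (Bool.false_ne_true)]
          by_cases hr : sid ∈ remaining
          · have hrc : PySem.Set.contains remaining sid = true := (PySem.Set.contains_iff _ _).mpr hr
            rw [dif_pos hrc]
            apply ih
            · intro k hk
              have hk' : k ∈ remaining ∧ k ≠ sid := (PySem.Set.mem_discard _ _ _).mp hk
              intro hkv
              rcases (PySem.Set.mem_add _ _ _).mp hkv with h | h
              · exact hIa k hk'.1 h
              · exact hk'.2 h
            · intro k hkey hkv
              have hkns : k ≠ sid := fun he => hkv ((PySem.Set.mem_add _ _ _).mpr (Or.inr he))
              have : k ∉ visited := fun hvm => hkv ((PySem.Set.mem_add _ _ _).mpr (Or.inl hvm))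
              exact (PySem.Set.mem_discard _ _ _).mpr ⟨hIb k hkey this, hkns⟩
            · intro k hkv
              rcases (PySem.Set.mem_add _ _ _).mp hkv with h | h
              · exact hIc k h
              · subst h
                intro hbm
                rw [((pv_mem_bulletIds style_map k).mp hbm).2] at hm
                exact Bool.noConfusion hm
            · have : (PySem.Set.discard remaining sid).length < remaining.length := by
                simp only [PySem.Set.discard]
                exact List.length_filter_lt_length_iff_exists.mpr ⟨sid, hr, by simp⟩
              omega
          · -- sid unvisited yet not remaining: not a key, so the chain dies at ""
            have hrc : PySem.Set.contains remaining sid ≠ true := fun hc =>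
              hr ((PySem.Set.contains_iff _ _).mp hc)
            rw [dif_neg hrc]
            have hnk : PySem.Dict.contains (⟨style_map⟩ : PySem.Dict String (List (String × String))) sid = false := by
              by_contra hk
              rw [Bool.not_eq_false] at hk
              exact hr (hIb sid hk hnv)
            have hmap : pvGetMap style_map sid = [] := pv_getMap_of_not_contains style_map sid hnk
            rw [hmap]
            have : pvGetS [] "basedOn" = "" := rfl
            rw [this, pv_resolve_empty_sid]
            rfl

-- ===== VERDICT (by name: the statement is the Claim_ definition above) =====
theorem is_bullet_style_py_spec : Claim_equal_is_bullet_style_py := by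
  intro style_id style_map _
  unfold Spec_is_bullet_style_py is_bullet_style_py is_bullet_style_py_alt
  apply pv_main
  · intro k _ hk
    simp [PySem.Set.empty] at hk
  · intro k hkey _
    rw [PySem.Set.mem_ofList]
    exact (pv_contains_iff_mem_keys style_map k).mp hkey
  · intro k hk
    simp [PySem.Set.empty] at hk
  · calc (PySem.Set.ofList (PySem.Dict.keys (⟨style_map⟩ : PySem.Dict String (List (String × String))))).length
        ≤ (PySem.Dict.keys (⟨style_map⟩ : PySem.Dict String (List (String × String)))).length :=
          PySem.Set.length_ofList_le _
      _ = style_map.length := by simp [PySem.Dict.keys]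
      _ < style_map.length + 1 := Nat.lt_succ_self _
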